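-- pv_equiv track=rewrite | github.com/pypi-data/pypi-mirror-400 | packages/cursus/cursus-1.4.7-py3-none-any.whl/cursus/step_catalog/step_catalog.py | _is_job_type_variant
-- ===== SOURCE A (Python) =====
-- def _is_job_type_variant(step_name: str) -> bool:
--     """Check if step name is a job type variant."""
--     JOB_SUFFIXES = [
--         "_calibration",
--         "_testing",
--         "_training",
--         "_validation",
--         "_inference",
--         "_evaluation",
--     ]
--     return any(step_name.endswith(suffix) for suffix in JOB_SUFFIXES)
-- ===== SOURCE B (Python) =====
-- SUFFIX_TOKENS = {"calibration", "testing", "training", "validation", "inference", "evaluation"}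
--
--
-- def _is_job_type_variant(step_name: str) -> bool:
--     """Check if step name is a job type variant."""
--     parts = step_name.rsplit("_", 1)
--     return len(parts) == 2 and parts[1] in SUFFIX_TOKENS
-- ===== Notes on version B (the rewrite author's own statement) =====
-- stated objective: idiomatic
-- what changed: Replaces the six per-suffix endswith scans with a single rsplit at the last underscore that extracts the trailing token once and tests membership in a constant set.
import Mathlib
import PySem

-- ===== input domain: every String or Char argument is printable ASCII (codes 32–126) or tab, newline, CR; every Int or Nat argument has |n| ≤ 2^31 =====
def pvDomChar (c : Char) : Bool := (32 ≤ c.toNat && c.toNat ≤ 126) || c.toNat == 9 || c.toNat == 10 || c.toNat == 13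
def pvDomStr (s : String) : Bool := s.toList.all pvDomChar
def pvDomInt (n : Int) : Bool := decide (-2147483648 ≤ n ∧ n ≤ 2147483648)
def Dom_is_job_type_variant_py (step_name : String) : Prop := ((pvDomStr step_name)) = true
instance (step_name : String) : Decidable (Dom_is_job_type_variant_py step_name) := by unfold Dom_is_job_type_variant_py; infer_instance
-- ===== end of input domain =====

-- B replaces the six per-suffix endswith scans with one rsplit('_', 1) token extraction and a set lookup (idiomatic).
-- ===== PORT A =====
def is_job_type_variant_py (step_name : String) : Bool :=
  let JOB_SUFFIXES : List String :=
    ["_calibration", "_testing", "_training", "_validation", "_inference", "_evaluation"]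
  JOB_SUFFIXES.any (fun suffix => PySem.Str.endswith step_name suffix)

-- ===== PORT B =====
-- the set literal SUFFIX_TOKENS (six distinct string literals)
def pvSuffixTokens : List (List Char) :=
  ["calibration".toList, "testing".toList, "training".toList,
   "validation".toList, "inference".toList, "evaluation".toList]

-- hand port of step_name.rsplit("_", 1) (exact here): scanning the reversed characters,
-- a split happens iff '_' occurs, and the last piece is everything after the last '_';
-- len(parts) == 2 iff '_' occurs in step_name.
def is_job_type_variant_py_alt (step_name : String) : Bool :=
  let r := step_name.toList.reverse
  if r.contains '_' then
    pvSuffixTokens.contains ((r.takeWhile (fun a => a ≠ '_')).reverse)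
  else false

-- ===== PRECONDITION & SPEC =====
def Spec_is_job_type_variant_py (step_name : String) (out : Bool) : Prop := out = is_job_type_variant_py_alt step_name
instance (step_name : String) (out : Bool) : Decidable (Spec_is_job_type_variant_py step_name out) := by unfold Spec_is_job_type_variant_py; infer_instance

-- ===== CLAIM (what is proved, stated in full; the proofs are below) =====
def Claim_equal_is_job_type_variant_py : Prop := ∀ (step_name : String), Dom_is_job_type_variant_py step_name → Spec_is_job_type_variant_py step_name (is_job_type_variant_py step_name)

-- ===== LEMMAS AND PROOFS =====
theorem pv_tw_append (p rest : List Char) (c : Char) (hc : c ∉ p) :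
    (p ++ c :: rest).takeWhile (fun a => a ≠ c) = p := by
  induction p with
  | nil => simp
  | cons x xs ih =>
    simp only [List.mem_cons, not_or] at hc
    have hxc : ¬ x = c := fun h => hc.1 h.symm
    simp only [decide_not] at ih
    simp [hxc]
    exact ih hc.2

theorem pv_split_at_mem (r : List Char) (c : Char) (hmem : c ∈ r) :
    r = r.takeWhile (fun a => a ≠ c) ++ c :: (r.dropWhile (fun a => a ≠ c)).tail := by
  induction r with
  | nil => simp at hmem
  | cons x xs ih =>
    by_cases hx : x = c
    · subst hx; simp
    · have hxs : c ∈ xs := by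
        rcases List.mem_cons.mp hmem with h | h
        · exact absurd h.symm hx
        · exact h
      have := ih hxs
      simp only [decide_not] at this
      simp [hx]
      exact this

theorem pv_key (r p : List Char) (c : Char) (hc : c ∉ p) :
    (p ++ [c]) <+: r ↔ (c ∈ r ∧ r.takeWhile (fun a => a ≠ c) = p) := by
  constructor
  · rintro ⟨rest, h⟩
    subst h
    refine ⟨by simp, ?_⟩
    have := pv_tw_append p rest c hc
    simpa using this
  · rintro ⟨hmem, htw⟩
    refine ⟨(r.dropWhile (fun a => a ≠ c)).tail, ?_⟩
    conv_rhs => rw [pv_split_at_mem r c hmem]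
    rw [htw]
    simp

theorem pv_endswith_token (l : List Char) (t : List Char) (ht : '_' ∉ t) :
    PySem.Chars.endswith l ('_' :: t)
      = (decide ('_' ∈ l.reverse) && (l.reverse.takeWhile (fun a => a ≠ '_') == t.reverse)) := by
  rw [Bool.eq_iff_iff]
  rw [PySem.Chars.endswith_iff]
  have h1 : ('_' :: t) <:+ l ↔ (t.reverse ++ ['_']) <+: l.reverse := by
    rw [← List.reverse_prefix]
    simp
  rw [h1, pv_key l.reverse t.reverse '_' (by simpa using ht)]
  simp

theorem is_job_type_variant_py_eq_alt (s : String) :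
    is_job_type_variant_py s = is_job_type_variant_py_alt s := by
  unfold is_job_type_variant_py is_job_type_variant_py_alt
  have e1 : "_calibration".toList = '_' :: "calibration".toList := by decide
  have e2 : "_testing".toList = '_' :: "testing".toList := by decide
  have e3 : "_training".toList = '_' :: "training".toList := by decide
  have e4 : "_validation".toList = '_' :: "validation".toList := by decide
  have e5 : "_inference".toList = '_' :: "inference".toList := by decide
  have e6 : "_evaluation".toList = '_' :: "evaluation".toList := by decide
  simp only [List.any_cons, List.any_nil, PySem.Str.endswith_eq, e1, e2, e3, e4, e5, e6,
    Bool.or_false]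
  rw [pv_endswith_token s.toList "calibration".toList (by decide),
      pv_endswith_token s.toList "testing".toList (by decide),
      pv_endswith_token s.toList "training".toList (by decide),
      pv_endswith_token s.toList "validation".toList (by decide),
      pv_endswith_token s.toList "inference".toList (by decide),
      pv_endswith_token s.toList "evaluation".toList (by decide)]
  by_cases hm : '_' ∈ s.toList.reverse
  · simp [pvSuffixTokens, hm, List.reverse_eq_iff]
    simp only [show ∀ (a b : List Char), (a == b) = decide (a = b) from
      fun a b => by by_cases h : a = b <;> simp [h]]
  · simp [hm]

-- ===== VERDICT (by name: the statement is the Claim_ definition above) =====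
theorem is_job_type_variant_py_spec : Claim_equal_is_job_type_variant_py := by
  intro s _
  unfold Spec_is_job_type_variant_py
  exact is_job_type_variant_py_eq_alt s
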